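-- pv_equiv track=rewrite | github.com/hedb/aoc2023 | r12.py | calc_line_counters
-- ===== SOURCE A (Python) =====
-- def calc_line_counters(line):
--     ret = []
--     current_section = 0
--     for c in line:
--         if c not in '#.':
--             raise Exception('Wrong input :' + line)
--         if c == '#':
--             current_section += 1
--         elif current_section > 0:
--             ret.append(current_section)
--             current_section = 0
--     if current_section > 0:
--         ret.append(current_section)
--     return ret
-- ===== SOURCE B (Python) =====
-- def calc_line_counters(line):
--     for c in line:
--         if c not in '#.':
--             raise Exception('Wrong input :' + line)
--     return [len(s) for s in line.split('.') if s]
-- ===== Notes on version B (the rewrite author's own statement) =====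
-- stated objective: simpler
-- what changed: Replaces the char-by-char counter accumulation (with end-of-group flushes and a final flush) by validating the line up front and then splitting on '.' and taking the lengths of the non-empty segments.
import Mathlib
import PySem

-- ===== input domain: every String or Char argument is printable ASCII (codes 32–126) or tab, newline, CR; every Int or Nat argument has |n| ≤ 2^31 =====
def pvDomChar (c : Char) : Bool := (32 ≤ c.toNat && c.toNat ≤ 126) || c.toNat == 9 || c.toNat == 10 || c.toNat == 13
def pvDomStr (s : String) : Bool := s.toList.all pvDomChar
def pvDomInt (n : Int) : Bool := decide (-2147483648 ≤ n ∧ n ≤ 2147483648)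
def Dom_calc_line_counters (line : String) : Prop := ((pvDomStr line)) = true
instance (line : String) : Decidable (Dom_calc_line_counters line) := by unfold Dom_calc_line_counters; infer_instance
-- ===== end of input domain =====

-- B validates the line up front, then splits on '.' and measures the non-empty segments,
-- replacing A's running-counter accumulation; objective: simpler. Pre_ excludes lines with a
-- character other than '#'/'.', on which both Pythons raise Exception('Wrong input :...').


-- ===== PORT A =====
-- the for-loop: state (ret, current_section); the 'raise' branch is excluded by Pre_,
-- for any other non-'#' char the loop takes the 'elif' branch exactly as Python does.
def pvAStep (p : List Int × Int) (c : Char) : List Int × Int :=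
  if c = '#' then (p.1, p.2 + 1)
  else if p.2 > 0 then (p.1 ++ [p.2], 0)
  else (p.1, p.2)

def calc_line_counters (line : String) : List Int :=
  let st := line.toList.foldl pvAStep ([], 0)
  if st.2 > 0 then st.1 ++ [st.2] else st.1

-- ===== PORT B =====
-- hand port of str.split with the one-char separator '.': exact for this separator
def pvSplitDot : List Char → List (List Char)
  | [] => [[]]
  | c :: cs =>
    match pvSplitDot cs with
    | h :: t => if c = '.' then [] :: h :: t else (c :: h) :: t
    | [] => [[]]

def calc_line_counters_alt (line : String) : List Int :=
  ((pvSplitDot line.toList).filter (· ≠ [])).map (fun s => (s.length : Int))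

-- ===== PRECONDITION & SPEC =====
-- Pre_ excludes exactly the lines containing a character other than '#' or '.', on which A raises Exception.
def Pre_calc_line_counters (line : String) : Prop :=
  (line.toList.all (fun c => c == '#' || c == '.')) = true
instance (line : String) : Decidable (Pre_calc_line_counters line) := by
  unfold Pre_calc_line_counters; infer_instance

def pvWitness_calc_line_counters : String := "#.#"

def Spec_calc_line_counters (line : String) (out : List Int) : Prop := out = calc_line_counters_alt line
instance (line : String) (out : List Int) : Decidable (Spec_calc_line_counters line out) := by unfold Spec_calc_line_counters; infer_instance

-- ===== CLAIM (what is proved, stated in full; the proofs are below) =====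
def Claim_equal_calc_line_counters : Prop := ∀ (line : String), Dom_calc_line_counters line → Pre_calc_line_counters line → Spec_calc_line_counters line (calc_line_counters line)

-- ===== LEMMAS AND PROOFS =====

-- A's loop, written as a structural recursion used only in the proofs
def pvGroups : Int → List Char → List Int
  | cur, [] => if cur > 0 then [cur] else []
  | cur, c :: cs =>
    if c = '#' then pvGroups (cur + 1) cs
    else if cur > 0 then cur :: pvGroups 0 cs
    else pvGroups cur cs

lemma pvA_eq_groups (cs : List Char) : ∀ (acc : List Int) (cur : Int),
    (let st := cs.foldl pvAStep (acc, cur);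
     if st.2 > 0 then st.1 ++ [st.2] else st.1) = acc ++ pvGroups cur cs := by
  induction cs with
  | nil =>
    intro acc cur
    simp only [List.foldl, pvGroups]
    split_ifs <;> simp
  | cons c cs ih =>
    intro acc cur
    simp only [List.foldl, pvAStep, pvGroups]
    by_cases hc : c = '#'
    · simp [hc, ih]
    · by_cases hcur : cur > 0
      · simp [hc, hcur, ih]
      · simp [hc, hcur, ih]

lemma pvSplitDot_ne_nil (cs : List Char) : pvSplitDot cs ≠ [] := by
  cases cs with
  | nil => simp [pvSplitDot]
  | cons c cs =>
    simp only [pvSplitDot]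
    cases pvSplitDot cs with
    | nil => simp
    | cons h t => split_ifs <;> simp

lemma pvGroups_eq_split : ∀ (cs : List Char), (∀ c ∈ cs, c = '#' ∨ c = '.') →
    ∀ cur : Int, 0 ≤ cur →
      pvGroups cur cs =
        (match pvSplitDot cs with
         | h :: t => if cur + (h.length : Int) > 0
             then (cur + (h.length : Int)) :: (t.filter (· ≠ [])).map (fun s => (s.length : Int))
             else (t.filter (· ≠ [])).map (fun s => (s.length : Int))
         | [] => []) := by
  intro cs
  induction cs with
  | nil =>
    intro _ cur hcur
    simp only [pvGroups, pvSplitDot]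
    split_ifs with h1 h2 <;> simp_all; omega
  | cons c cs ih =>
    intro h cur hcur
    obtain ⟨h0, t0, hst⟩ : ∃ a l, pvSplitDot cs = a :: l := by
      cases e : pvSplitDot cs with
      | nil => exact absurd e (pvSplitDot_ne_nil cs)
      | cons a l => exact ⟨a, l, rfl⟩
    have ih' := ih (fun x hx => h x (List.mem_cons_of_mem _ hx))
    rcases h c (List.mem_cons_self ..) with hc | hc <;> subst hc
    · -- c = '#'
      have hsd : pvSplitDot ('#' :: cs) = ('#' :: h0) :: t0 := by
        simp [pvSplitDot, hst]
      have hg : pvGroups cur ('#' :: cs) = pvGroups (cur + 1) cs := by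
        simp [pvGroups]
      rw [hg, ih' (cur + 1) (by omega), hsd, hst]
      simp only [List.length_cons]
      push_cast
      have harith : cur + 1 + (h0.length : Int) = cur + ((h0.length : Int) + 1) := by ring
      rw [harith]
    · -- c = '.'
      have hsd : pvSplitDot ('.' :: cs) = [] :: h0 :: t0 := by
        simp [pvSplitDot, hst]
      rw [hsd]
      have hfilt : ((h0 :: t0).filter (· ≠ [])).map (fun s => ((s.length : Int))) =
          if (0 : Int) + (h0.length : Int) > 0
          then ((0 : Int) + (h0.length : Int)) :: (t0.filter (· ≠ [])).map (fun s => ((s.length : Int)))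
          else (t0.filter (· ≠ [])).map (fun s => ((s.length : Int))) := by
        by_cases h0e : h0 = []
        · subst h0e; simp
        · have : (h0.length : Int) > 0 := by
            have := List.length_pos_of_ne_nil h0e; omega
          simp [h0e]
      have hrec : pvGroups 0 cs =
          ((h0 :: t0).filter (· ≠ [])).map (fun s => ((s.length : Int))) := by
        rw [ih' 0 le_rfl, hst, hfilt]
      have hg : pvGroups cur ('.' :: cs) =
          if cur > 0 then cur :: pvGroups 0 cs else pvGroups cur cs := by
        simp [pvGroups]
      by_cases hcur0 : cur > 0
      · simp only [pvGroups, if_neg (by decide : ¬ ('.' = '#')), if_pos hcur0, hrec]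
        simp [hcur0]
      · have hz : cur = 0 := by omega
        subst hz
        simp only [pvGroups, if_neg (by decide : ¬ ('.' = '#'))]
        rw [hrec, hfilt]
        simp

-- ===== VERDICT (by name: the statement is the Claim_ definition above) =====
theorem calc_line_counters_spec : Claim_equal_calc_line_counters := by
  intro line _ hpre
  have hpre' : ∀ c ∈ line.toList, c = '#' ∨ c = '.' := by
    intro c hc
    have := List.all_eq_true.mp hpre c hc
    simpa using this
  unfold Spec_calc_line_counters calc_line_counters calc_line_counters_alt
  rw [pvA_eq_groups line.toList [] 0, List.nil_append,
      pvGroups_eq_split line.toList hpre' 0 le_rfl]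
  obtain ⟨h0, t0, hst⟩ : ∃ a l, pvSplitDot line.toList = a :: l := by
    cases e : pvSplitDot line.toList with
    | nil => exact absurd e (pvSplitDot_ne_nil _)
    | cons a l => exact ⟨a, l, rfl⟩
  rw [hst]
  by_cases h0e : h0 = []
  · subst h0e; simp
  · have : (h0.length : Int) > 0 := by
      have := List.length_pos_of_ne_nil h0e; omega
    simp [h0e]
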